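-- pv_equiv track=rewrite | github.com/ymtz13/CompetitiveProgramming | AtCoder/ARC178/C.py | f
-- ===== SOURCE A (Python) =====
-- def f(L):
--     M = L // 2
--     P0 = 1 if L % 2 == 0 else 2
--     P = [P0 + 2 * i for i in range(M)]
--
--     S = sum(P)
--
--     q = S
--     Q = []
--     for p in P:
--         if q <= 200000:
--             Q.append(q)
--         q -= p
--
--     return Q
-- ===== SOURCE B (Python) =====
-- def f(L):
--     M = L // 2
--     P0 = 1 if L % 2 == 0 else 2
--
--     def T(i):
--         # suffix sum of the arithmetic sequence: sum_{j=i}^{M-1} (P0 + 2*j)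
--         return (M - i) * (P0 + M + i - 1)
--
--     lo, hi = 0, M if M > 0 else 0
--     while lo < hi:
--         mid = (lo + hi) // 2
--         if T(mid) <= 200000:
--             hi = mid
--         else:
--             lo = mid + 1
--     return [T(i) for i in range(lo, M)]
-- ===== Notes on version B (the rewrite author's own statement) =====
-- stated objective: faster
-- what changed: Instead of materializing the whole arithmetic sequence and scanning it with running sums, B computes each suffix sum by a closed-form formula and binary-searches for the first index whose suffix sum is <= 200000, emitting only the qualifying tail.
import Mathlib
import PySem

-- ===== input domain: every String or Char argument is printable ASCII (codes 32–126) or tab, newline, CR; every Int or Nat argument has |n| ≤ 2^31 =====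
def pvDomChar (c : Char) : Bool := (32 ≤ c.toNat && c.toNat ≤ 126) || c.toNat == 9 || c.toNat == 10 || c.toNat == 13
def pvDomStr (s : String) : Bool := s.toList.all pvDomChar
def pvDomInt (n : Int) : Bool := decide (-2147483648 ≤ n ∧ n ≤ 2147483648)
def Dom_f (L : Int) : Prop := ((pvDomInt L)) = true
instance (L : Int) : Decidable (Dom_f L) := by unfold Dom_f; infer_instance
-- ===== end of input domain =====

-- B replaces A's full sequence materialization and running-sum scan by a closed-form
-- suffix-sum formula plus a binary search for the first index with suffix sum ≤ 200000.

-- ===== PORT A =====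
def f (L : Int) : List Int :=
  let M := PySem.Int.floordiv L 2
  let P0 : Int := if PySem.Int.mod L 2 = 0 then 1 else 2
  let P := (PySem.List.pyRange 0 M 1).map (fun i => P0 + 2 * i)
  let S := P.foldl (· + ·) 0
  (P.foldl (fun (st : Int × List Int) p =>
      (st.1 - p, if st.1 ≤ 200000 then st.2 ++ [st.1] else st.2)) (S, ([] : List Int))).2

-- ===== PORT B =====
-- the 'while lo < hi' loop of Source B, with fuel (the interval shrinks each step; fuel = M.toNat suffices)
def fBsearch (T : Int → Int) : Nat → Int → Int → Int
  | 0, lo, _ => lo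
  | fuel + 1, lo, hi =>
    if lo < hi then
      let mid := PySem.Int.floordiv (lo + hi) 2
      if T mid ≤ 200000 then fBsearch T fuel lo mid
      else fBsearch T fuel (mid + 1) hi
    else lo

def f_alt (L : Int) : List Int :=
  let M := PySem.Int.floordiv L 2
  let P0 : Int := if PySem.Int.mod L 2 = 0 then 1 else 2
  let T := fun i => (M - i) * (P0 + M + i - 1)
  let hi := if M > 0 then M else 0
  let lo := fBsearch T M.toNat 0 hi
  (PySem.List.pyRange lo M 1).map T

-- ===== PRECONDITION & SPEC =====
def Spec_f (L : Int) (out : List Int) : Prop := out = f_alt L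
instance (L : Int) (out : List Int) : Decidable (Spec_f L out) := by unfold Spec_f; infer_instance

-- ===== CLAIM (what is proved, stated in full; the proofs are below) =====
def Claim_equal_f : Prop := ∀ (L : Int), Dom_f L → Spec_f L (f L)

-- ===== LEMMAS AND PROOFS =====

-- the loop step of A's port, named for the lemmas below
def fStep : Int × List Int → Int → Int × List Int :=
  fun st p => (st.1 - p, if st.1 ≤ 200000 then st.2 ++ [st.1] else st.2)

-- closed form of the suffix sums: B's T
def fT (M P0 : Int) : Int → Int := fun i => (M - i) * (P0 + M + i - 1)

-- the predicate 'suffix sum ≤ 200000' is upward closed in the index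
theorem fT_mono (M P0 : Int) (hP0 : 1 ≤ P0) (i j : Int) (hi : 0 ≤ i) (hij : i ≤ j)
    (h : fT M P0 i ≤ 200000) : fT M P0 j ≤ 200000 := by
  have key : fT M P0 i - fT M P0 j = (j - i) * (P0 + i + j - 1) := by
    unfold fT; ring
  nlinarith [mul_nonneg (by omega : (0:Int) ≤ j - i) (by omega : (0:Int) ≤ P0 + i + j - 1)]

-- the Python sum(P) equals fT M P0 0
theorem fSum (P0 : Int) : ∀ N : Nat,
    (((PySem.List.pyRange 0 (N : Int) 1).map (fun i => P0 + 2 * i)).foldl (· + ·) 0)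
      = fT (N : Int) P0 0 := by
  have h : ∀ N : Nat, ((List.range N).map (fun k : Nat => P0 + 2 * (k : Int))).sum
      = (N : Int) * P0 + (N : Int) * ((N : Int) - 1) := by
    intro N
    induction N with
    | zero => simp
    | succ n ih =>
      rw [List.range_succ, List.map_append, List.sum_append, ih]
      simp only [List.map_cons, List.map_nil, List.sum_cons, List.sum_nil]
      push_cast; ring
  intro N
  rw [← List.sum_eq_foldl, PySem.List.pyRange_zero_natCast, List.map_map]
  simp only [Function.comp_def]
  rw [h N]; unfold fT; ring

-- A's scan over the tail of the sequence, as a filter of the closed-form suffix sums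
theorem fLoop (M P0 : Int) : ∀ (n : Nat) (a : Int) (acc : List Int), 0 ≤ a → a + n = M →
    (((PySem.List.pyRange a M 1).map (fun i => P0 + 2 * i)).foldl fStep (fT M P0 a, acc)).2
      = acc ++ ((PySem.List.pyRange a M 1).map (fT M P0)).filter (fun x => decide (x ≤ 200000)) := by
  intro n
  induction n with
  | zero =>
    intro a acc _ hM
    rw [PySem.List.pyRange_one_eq_nil (by omega)]
    simp
  | succ n ih =>
    intro a acc ha hM
    rw [PySem.List.pyRange_one_cons (by omega : a < M)]
    simp only [List.map_cons, List.foldl_cons, List.filter_cons]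
    have hstep : fStep (fT M P0 a, acc) (P0 + 2 * a)
        = (fT M P0 (a + 1), if fT M P0 a ≤ 200000 then acc ++ [fT M P0 a] else acc) := by
      unfold fStep fT; simp only [Prod.mk.injEq]; constructor
      · ring
      · trivial
    rw [hstep, ih (a + 1) _ (by omega) (by omega)]
    by_cases h : fT M P0 a ≤ 200000 <;> simp [h]

-- binary-search invariant: result r splits [lo, hi] at the first index satisfying the predicate
theorem fBsearch_spec (M P0 : Int) (hP0 : 1 ≤ P0) : ∀ (fuel : Nat) (lo hi : Int),
    0 ≤ lo → lo ≤ hi → (hi - lo).toNat ≤ fuel →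
    lo ≤ fBsearch (fT M P0) fuel lo hi ∧ fBsearch (fT M P0) fuel lo hi ≤ hi ∧
    (∀ i, lo ≤ i → i < fBsearch (fT M P0) fuel lo hi → ¬ (fT M P0 i ≤ 200000)) ∧
    (fBsearch (fT M P0) fuel lo hi < hi → fT M P0 (fBsearch (fT M P0) fuel lo hi) ≤ 200000) := by
  intro fuel
  induction fuel with
  | zero =>
    intro lo hi h0 hle hf
    have : hi = lo := by omega
    subst this
    simp [fBsearch]
    omega
  | succ fuel ih =>
    intro lo hi h0 hle hf
    by_cases hlt : lo < hi
    · have hmidlo : lo ≤ PySem.Int.floordiv (lo + hi) 2 :=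
        (PySem.Int.floordiv_two_mid_bounds hle).1
      have hmidhi : PySem.Int.floordiv (lo + hi) 2 < hi :=
        (PySem.Int.floordiv_lt_iff_lt_mul (by norm_num)).mpr (by omega)
      set mid := PySem.Int.floordiv (lo + hi) 2 with hmid
      by_cases hp : fT M P0 mid ≤ 200000
      · have hrec := ih lo mid h0 hmidlo (by omega)
        simp only [fBsearch, if_pos hlt, ← hmid, if_pos hp]
        refine ⟨hrec.1, by omega, hrec.2.2.1, ?_⟩
        intro hrhi
        by_cases hr : fBsearch (fT M P0) fuel lo mid < mid
        · exact hrec.2.2.2 hr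
        · have : fBsearch (fT M P0) fuel lo mid = mid := by omega
          rw [this]; exact hp
      · have hrec := ih (mid + 1) hi (by omega) (by omega) (by omega)
        simp only [fBsearch, if_pos hlt, ← hmid, if_neg hp]
        refine ⟨by omega, hrec.2.1, ?_, hrec.2.2.2⟩
        intro i hi1 hi2 hpi
        by_cases him : i ≤ mid
        · exact hp (fT_mono M P0 hP0 i mid (by omega) him hpi)
        · exact hrec.2.2.1 i (by omega) hi2 hpi
    · simp only [fBsearch, if_neg hlt]
      have : hi = lo := by omega
      subst this
      exact ⟨le_refl _, le_refl _, by omega, by omega⟩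

-- the whole equivalence, stated over M and P0
theorem fMain (M P0 : Int) (hP0 : 1 ≤ P0) :
    (((PySem.List.pyRange 0 M 1).map (fun i => P0 + 2 * i)).foldl fStep
        ((((PySem.List.pyRange 0 M 1).map (fun i => P0 + 2 * i)).foldl (· + ·) 0), [])).2
      = (PySem.List.pyRange (fBsearch (fT M P0) M.toNat 0 (if M > 0 then M else 0)) M 1).map (fT M P0) := by
  by_cases hM : M ≤ 0
  · rw [PySem.List.pyRange_one_eq_nil hM]
    have hhi : (if M > 0 then M else 0) = 0 := by rw [if_neg (by omega)]
    have hfuel : M.toNat = 0 := by omega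
    rw [hhi, hfuel]
    have : fBsearch (fT M P0) 0 0 0 = 0 := rfl
    rw [this, PySem.List.pyRange_one_eq_nil hM]
    rfl
  · have hM0 : (0:Int) ≤ M := by omega
    have hM : 0 < M := by omega
    obtain ⟨N, hN⟩ : ∃ N : Nat, (N : Int) = M := ⟨M.toNat, by omega⟩
    have hhi : (if M > 0 then M else 0) = M := if_pos hM
    rw [hhi]
    have hsum : ((PySem.List.pyRange 0 M 1).map (fun i => P0 + 2 * i)).foldl (· + ·) 0
        = fT M P0 0 := by rw [← hN]; exact fSum P0 N
    rw [hsum]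
    rw [fLoop M P0 N 0 [] (le_refl 0) (by omega)]
    rw [List.nil_append]
    -- now relate the filter to the tail cut at the binary-search index
    have hspec := fBsearch_spec M P0 hP0 M.toNat 0 M (le_refl 0) hM0 (by omega)
    set r := fBsearch (fT M P0) M.toNat 0 M with hr
    obtain ⟨h1, h2, h3, h4⟩ := hspec
    rw [PySem.List.pyRange_one_append 0 r M h1 h2, List.map_append, List.filter_append]
    have hnil : ((PySem.List.pyRange 0 r 1).map (fT M P0)).filter (fun x => decide (x ≤ 200000)) = [] := by
      rw [List.filter_eq_nil_iff]
      intro x hx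
      simp only [List.mem_map, PySem.List.mem_pyRange_one] at hx
      obtain ⟨i, ⟨hi0, hir⟩, rfl⟩ := hx
      simpa using h3 i hi0 hir
    have hself : ((PySem.List.pyRange r M 1).map (fT M P0)).filter (fun x => decide (x ≤ 200000))
        = (PySem.List.pyRange r M 1).map (fT M P0) := by
      rw [List.filter_eq_self]
      intro x hx
      simp only [List.mem_map, PySem.List.mem_pyRange_one] at hx
      obtain ⟨i, ⟨hri, hiM⟩, rfl⟩ := hx
      have hpr : fT M P0 r ≤ 200000 := h4 (by omega)
      simpa using fT_mono M P0 hP0 r i (by omega) hri hpr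
    rw [hnil, hself, List.nil_append]

-- ===== VERDICT (by name: the statement is the Claim_ definition above) =====
theorem f_spec : Claim_equal_f := by
  intro L _
  show f L = f_alt L
  have hP0 : (1:Int) ≤ (if PySem.Int.mod L 2 = 0 then (1:Int) else 2) := by
    split_ifs <;> norm_num
  exact fMain (PySem.Int.floordiv L 2) _ hP0
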